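-- pv_equiv track=rewrite | github.com/Versallius/google_foobar | level4_RunningWithBunnies.py | solution
-- ===== SOURCE A (Python) =====
-- import copy
-- import itertools
--
-- def shortest_path(times):
--   # Bellman-Ford algorithm for finding shortest paths
--   # Normally Bellman-Ford requires stipulating a starting location
--   # Here we loop the algorithm to find pairwise shortest distances between all nodes in graph
--
--   mintimes = copy.deepcopy(times)
--   has_neg_cyc = False
--
--   nodes = list(range(len(times)))
--   edges = list(itertools.permutations(range(len(times)), 2)) # fully connected graph
--
--   for _ in range(len(times)-1):
--     for edge in edges:
--       initial, final = edge[0], edge[1]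
--       other_nodes = [i for i in nodes if i not in edge]
--       for node in other_nodes:
--           mintimes[initial][final] = min(mintimes[initial][final], mintimes[initial][node] + mintimes[node][final])
--
--   for edge in edges:
--     initial, final = edge[0], edge[1]
--     dists = mintimes[0]
--     if dists[initial] + times[initial][final] < dists[final]:
--       has_neg_cyc = True
--
--   return mintimes, has_neg_cyc
--
-- def get_path_time(bunnies, mintimes):
--   # Minimum path to save this set of bunnies
--   path_time = 0
--   for i, bunny in enumerate(bunnies):
--     if i == 0:
--       previous = 0
--     else:
--       previous = bunnies[i-1]+1
--     path_time += mintimes[previous][bunny+1]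
--   path_time += mintimes[bunny+1][-1]
--   return path_time
--
-- def solution(times, time_limit):
--   n_bunnies = len(times)-2
--   mintimes, has_neg_cyc = shortest_path(times)
--
--   # if the graph has the negative valued cycle, then we can endlessly loop this for infinite time and save all bunnies
--   if has_neg_cyc:
--     return list(range(n_bunnies))
--
--   # otherwise, we check all combinations of bunnies that can be saved to see which are possible
--   for n_saved in range(n_bunnies, 0, -1):
--     to_save_list = list(itertools.permutations(range(n_bunnies), n_saved))
--     for to_save in to_save_list:
--
--       path_time = get_path_time(to_save, mintimes)
--       if path_time <= time_limit:
--         return list(sorted(to_save))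
-- ===== SOURCE B (Python) =====
-- from itertools import combinations
--
-- def solution(times, time_limit):
--     n = len(times)
--     nb = n - 2
--
--     # --- all-pairs relaxation, same schedule as the spec (n-1 rounds over ordered pairs) ---
--     m = [row[:] for row in times]
--     for _ in range(n - 1):
--         for i in range(n):
--             for f in range(n):
--                 if f == i:
--                     continue
--                 for node in range(n):
--                     if node == i or node == f:
--                         continue
--                     s = m[i][node] + m[node][f]
--                     if s < m[i][f]:
--                         m[i][f] = s
--
--     # negative cycle reachable in row 0's relaxed distances
--     neg = any(m[0][i] + times[i][f] < m[0][f]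
--               for i in range(n) for f in range(n) if f != i)
--     if neg:
--         return list(range(nb))
--     if nb <= 0:
--         return None
--
--     # --- Held-Karp-style table over bunny subsets, replacing the n! permutation scan ---
--     # h[(prev, S, r)] = min over length-r sequences p of distinct bunnies drawn from S of
--     #                   cost(prev -> p[0]+1 -> ... -> p[r-1]+1 -> bulkhead), smaller subsets first
--     keys = [(prev, S, r)
--             for s in range(nb + 1)
--             for S in combinations(range(nb), s)
--             for prev in range(n)
--             for r in range(s + 1)]
--     h = {}
--     for (prev, S, r) in keys:
--         h[(prev, S, r)] = m[prev][-1] if r == 0 else min(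
--             m[prev][b + 1] + h[(b + 1, tuple(x for x in S if x != b), r - 1)]
--             for b in S)
--
--     full = tuple(range(nb))
--     for k in range(nb, 0, -1):
--         if h[(0, full, k)] <= time_limit:
--             # reconstruct the lexicographically first feasible permutation of size k
--             avail = list(range(nb))
--             prev, c, chosen = 0, 0, []
--             for j in range(k):
--                 for b in avail:
--                     rest = tuple(x for x in avail if x != b)
--                     if c + m[prev][b + 1] + h[(b + 1, rest, k - 1 - j)] <= time_limit:
--                         chosen.append(b)
--                         c += m[prev][b + 1]
--                         prev = b + 1
--                         avail.remove(b)
--                         break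
--             return sorted(chosen)
--     return None
-- ===== Notes on version B (the rewrite author's own statement) =====
-- stated objective: faster
-- what changed: The factorial scan over all k-permutations of bunnies (largest k first, recomputing each path time from scratch) is replaced by a Held-Karp-style dynamic program over (previous node, bunny subset, count) giving the minimal path time for each subset size, plus a greedy lexicographic reconstruction that yields exactly the permutation A's scan finds first; the all-pairs relaxation phase is kept with the same in-place update schedule (its result on graphs with negative cycles is order-dependent) but written as plain nested loops.
import Mathlib
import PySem

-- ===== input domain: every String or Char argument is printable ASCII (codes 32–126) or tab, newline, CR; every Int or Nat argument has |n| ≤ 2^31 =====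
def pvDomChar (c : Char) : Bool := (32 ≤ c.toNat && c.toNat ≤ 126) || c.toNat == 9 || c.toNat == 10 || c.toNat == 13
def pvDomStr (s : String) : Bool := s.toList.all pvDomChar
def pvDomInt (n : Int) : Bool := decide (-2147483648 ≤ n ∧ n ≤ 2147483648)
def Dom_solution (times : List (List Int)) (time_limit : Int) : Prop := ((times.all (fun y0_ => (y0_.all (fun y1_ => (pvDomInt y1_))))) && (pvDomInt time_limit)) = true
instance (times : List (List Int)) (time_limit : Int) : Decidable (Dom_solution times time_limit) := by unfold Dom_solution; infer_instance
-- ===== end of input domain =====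

-- B replaces A's factorial scan over bunny permutations by a Held-Karp-style subset
-- DP plus a greedy lexicographic reconstruction; the relaxation phase keeps A's exact
-- in-place update schedule (its result is order-dependent) as plain nested loops.
-- A mutates no argument observably (it deep-copies `times`); equivalence is about return values.

-- ===== PORT A =====
-- Shared indexing helpers (both Pythons read/write m[i][j] the same way); the default 0 / []
-- is only ever returned for an out-of-range index, which Python A/B raise on and
-- Pre_solution excludes.
def aGet (m : List (List Int)) (i j : Int) : Int :=
  PySem.List.pyGetD (PySem.List.pyGetD m i []) j 0

def aSet (m : List (List Int)) (i j : Int) (v : Int) : List (List Int) :=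
  PySem.List.pySetD m i (PySem.List.pySetD (PySem.List.pyGetD m i []) j v)

-- shortest_path: n-1 rounds of in-place relaxation over all ordered pairs, then the
-- negative-cycle test against row 0 (mintimes = deepcopy(times) is just `times` here).
def shortestPathA (times : List (List Int)) : List (List Int) × Bool :=
  let n : Int := PySem.List.len times
  let nodes := PySem.List.pyRange 0 n 1
  let edges := PySem.List.permutations nodes 2
  let mintimes := (PySem.List.pyRange 0 (n - 1) 1).foldl (fun m _ =>
    edges.foldl (fun m e =>
      let initial := PySem.List.pyGetD e 0 0
      let final := PySem.List.pyGetD e 1 0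
      let others := nodes.filter (fun i => !(e.contains i))
      others.foldl (fun m node =>
        aSet m initial final
          (min (aGet m initial final) (aGet m initial node + aGet m node final))) m) m) times
  let hasNeg := edges.foldl (fun flag e =>
    let initial := PySem.List.pyGetD e 0 0
    let final := PySem.List.pyGetD e 1 0
    let dists := PySem.List.pyGetD mintimes 0 []
    if PySem.List.pyGetD dists initial 0 + aGet times initial final
        < PySem.List.pyGetD dists final 0 then true else flag) false
  (mintimes, hasNeg)

-- get_path_time: the enumerate loop carried as an accumulating recursion: `previous`
-- (= bunnies[i-1]+1, or 0 at i=0) is the first accumulator, path_time the second;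
-- the trailing `+ mintimes[bunny+1][-1]` is the base case (never reached with prev=0:
-- A only calls this on nonempty tuples).
def gptGo (m : List (List Int)) : Int → Int → List Int → Int
  | prev, acc, [] => acc + aGet m prev (-1)
  | prev, acc, b :: rest => gptGo m (b + 1) (acc + aGet m prev (b + 1)) rest

def getPathTime (bunnies : List Int) (mintimes : List (List Int)) : Int :=
  gptGo mintimes 0 0 bunnies

def solution (times : List (List Int)) (time_limit : Int) : Option (List Int) :=
  let nb : Int := PySem.List.len times - 2
  let r := shortestPathA times
  if r.2 then some (PySem.List.pyRange 0 nb 1)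
  else
    (PySem.List.pyRange nb 0 (-1)).findSome? (fun k =>
      match (PySem.List.permutations (PySem.List.pyRange 0 nb 1) k.toNat).find?
          (fun p => decide (getPathTime p r.1 ≤ time_limit)) with
      | some p => some (PySem.List.sorted p (fun x => x) false)
      | none => none)

-- ===== PORT B =====
def bRelax (times : List (List Int)) : List (List Int) :=
  let n : Int := PySem.List.len times
  (PySem.List.pyRange 0 (n - 1) 1).foldl (fun m _ =>
    (PySem.List.pyRange 0 n 1).foldl (fun m i =>
      (PySem.List.pyRange 0 n 1).foldl (fun m f =>
        if f == i then m
        else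
          (PySem.List.pyRange 0 n 1).foldl (fun m node =>
            if node == i || node == f then m
            else
              let s := aGet m i node + aGet m node f
              if s < aGet m i f then aSet m i f s else m) m) m) m) times

def bNeg (m times : List (List Int)) (n : Int) : Bool :=
  (PySem.List.pyRange 0 n 1).any (fun i =>
    (PySem.List.pyRange 0 n 1).any (fun f =>
      !(f == i) && decide (aGet m 0 i + aGet times i f < aGet m 0 f)))

-- the flat key list [(prev, S, r) for s in … for S in … for prev in … for r in …]
def bKeys (nb n : Int) : List (Int × List Int × Int) :=
  (PySem.List.pyRange 0 (nb + 1) 1).flatMap (fun s =>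
    (PySem.List.combinations (PySem.List.pyRange 0 nb 1) s.toNat).flatMap (fun S =>
      (PySem.List.pyRange 0 n 1).flatMap (fun prev =>
        (PySem.List.pyRange 0 (s + 1) 1).map (fun r => (prev, S, r)))))

def bBuildH (m : List (List Int)) (keys : List (Int × List Int × Int)) :
    PySem.Dict (Int × List Int × Int) Int :=
  keys.foldl (fun d key =>
    let prev := key.1; let S := key.2.1; let r := key.2.2
    d.insert key
      (if r == 0 then aGet m prev (-1)
       else (PySem.List.min?
              (S.map (fun b => aGet m prev (b + 1) +
                d.getD (b + 1, S.filter (fun x => !(x == b)), r - 1) 0))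
              (fun v => v)).getD 0)) PySem.Dict.empty

def solution_alt (times : List (List Int)) (time_limit : Int) : Option (List Int) :=
  let n : Int := PySem.List.len times
  let nb : Int := n - 2
  let m := bRelax times
  if bNeg m times n then some (PySem.List.pyRange 0 nb 1)
  else if nb ≤ 0 then none
  else
    let h := bBuildH m (bKeys nb n)
    let full := PySem.List.pyRange 0 nb 1
    match (PySem.List.pyRange nb 0 (-1)).find?
        (fun k => decide (h.getD (0, full, k) 0 ≤ time_limit)) with
    | none => none
    | some k =>
      let st := (PySem.List.pyRange 0 k 1).foldl
        (fun (st : List Int × Int × Int × List Int) j =>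
          let avail := st.1; let prev := st.2.1; let c := st.2.2.1; let chosen := st.2.2.2
          match avail.find? (fun b => decide (c + aGet m prev (b + 1) +
              h.getD (b + 1, avail.filter (fun x => !(x == b)), k - 1 - j) 0 ≤ time_limit)) with
          | none => st
          | some b => (avail.erase b, b + 1, c + aGet m prev (b + 1), chosen ++ [b]))
        (full, 0, 0, [])
      some (PySem.List.sorted st.2.2.2 (fun x => x) false)

-- ===== PRECONDITION & SPEC =====
-- Pre_solution: every row long enough for each index A reads (rows 0..n-2 need n columns,
-- the last row is only read at columns ≤ n-2 and via [-1], so n-1 suffice); on shorter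
-- rows Python A raises IndexError.
def Pre_solution (times : List (List Int)) (time_limit : Int) : Prop :=
  ∀ i < times.length,
    (if i + 1 = times.length then times.length - 1 else times.length) ≤ (times.getD i []).length

instance (times : List (List Int)) (time_limit : Int) : Decidable (Pre_solution times time_limit) := by
  unfold Pre_solution; infer_instance

def pvWitness_solution : List (List Int) × Int :=
  ([[0, 2, 2, 2], [9, 0, 1, 9], [9, 3, 0, 9], [9, 9, 9, 0]], 1)

def Spec_solution (times : List (List Int)) (time_limit : Int) (out : Option (List Int)) : Prop :=
  out = solution_alt times time_limit

instance (times : List (List Int)) (time_limit : Int) (out : Option (List Int)) :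
    Decidable (Spec_solution times time_limit out) := by
  unfold Spec_solution; infer_instance

-- ===== CLAIM (what is proved, stated in full; the proofs are below) =====
def Claim_equal_solution : Prop :=
  ∀ (times : List (List Int)) (time_limit : Int), Dom_solution times time_limit →
    Pre_solution times time_limit → Spec_solution times time_limit (solution times time_limit)

-- ===== LEMMAS AND PROOFS =====

-- ---- generic list helpers ----
theorem pv_find?_flatMap {α β : Type} (l : List α) (g : α → List β) (p : β → Bool) :
    (l.flatMap g).find? p = l.findSome? (fun x => (g x).find? p) := by
  induction l with
  | nil => rfl
  | cons x xs ih =>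
    simp only [List.flatMap_cons, List.find?_append, List.findSome?_cons, ih]
    cases (g x).find? p <;> rfl

theorem pv_find?_congr_mem {α : Type} {l : List α} {p q : α → Bool}
    (h : ∀ x ∈ l, p x = q x) : l.find? p = l.find? q := by
  induction l with
  | nil => rfl
  | cons x xs ih =>
    simp only [List.find?_cons, h x (by simp)]
    cases q x
    · exact ih (fun y hy => h y (by simp [hy]))
    · rfl

theorem pv_flatMap_range_getElem {α β : Type} (xs : List α) (G : α → List β) :
    (List.range xs.length).flatMap (fun i => ((xs[i]?.map G).getD [])) = xs.flatMap G := by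
  induction xs with
  | nil => rfl
  | cons x t ih =>
    rw [List.length_cons, List.range_succ_eq_map]
    simp only [List.flatMap_cons, List.flatMap_map]
    simp only [List.getElem?_cons_zero, Nat.succ_eq_add_one, List.getElem?_cons_succ,
      Option.map_some, Option.getD_some]
    rw [ih]

-- ---- permutations reshaping ----
theorem pv_perms_succ {α : Type} (xs : List α) (r : Nat) :
    PySem.List.permutations xs (r + 1) =
      (List.range xs.length).flatMap (fun i =>
        match xs[i]? with
        | none => []
        | some x => (PySem.List.permutations (xs.eraseIdx i) r).map (x :: ·)) := by
  rw [PySem.List.permutations.eq_def]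
  rfl

theorem pv_perms_succ_filter (xs : List Int) (h : xs.Nodup) (r : Nat) :
    PySem.List.permutations xs (r + 1) =
      xs.flatMap (fun b =>
        (PySem.List.permutations (xs.filter (fun y => !(y == b))) r).map (b :: ·)) := by
  rw [pv_perms_succ,
    ← pv_flatMap_range_getElem xs
      (fun b => (PySem.List.permutations (xs.filter (fun y => !(y == b))) r).map (b :: ·))]
  apply List.flatMap_congr
  intro i hi
  have hlt : i < xs.length := List.mem_range.mp hi
  rw [List.getElem?_eq_getElem hlt]
  have he : xs.eraseIdx i = xs.filter (fun y => !(y == xs[i])) := by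
    rw [← h.erase_getElem i hlt, h.erase_eq_filter]
    simp [bne]
  simp [he]

theorem pv_perms_two (xs : List Int) (h : xs.Nodup) :
    PySem.List.permutations xs 2 =
      xs.flatMap (fun i => (xs.filter (fun f => !(f == i))).map (fun f => [i, f])) := by
  rw [show (2:Nat) = 1 + 1 from rfl, pv_perms_succ_filter xs h 1]
  apply List.flatMap_congr
  intro i _
  rw [pv_perms_succ_filter _ (h.filter _) 0]
  simp only [PySem.List.permutations, List.map_flatMap]
  exact (List.map_eq_flatMap).symm

-- ---- in-place min-update: A's unconditional write = B's guarded write ----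
theorem pv_pySetD_pyGetD_self {α : Type} (xs : List α) (i : Int) (d : α) :
    PySem.List.pySetD xs i (PySem.List.pyGetD xs i d) = xs := by
  unfold PySem.List.pySetD PySem.List.pySet? PySem.List.pyGetD PySem.List.pyGet?
  unfold PySem.List.pyIdx?
  split_ifs with h1 h2 h3
  · have hk : i.toNat < xs.length := by omega
    simp [List.getElem?_eq_getElem hk, List.set_getElem_self]
  · rfl
  · have hk : xs.length - (-i).toNat < xs.length := by omega
    simp [List.getElem?_eq_getElem hk, List.set_getElem_self]
  · rfl

theorem pv_aSet_min (m : List (List Int)) (i j s : Int) :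
    aSet m i j (min (aGet m i j) s) = if s < aGet m i j then aSet m i j s else m := by
  by_cases hs : s < aGet m i j
  · rw [if_pos hs, min_eq_right hs.le]
  · rw [if_neg hs, min_eq_left (not_lt.mp hs)]
    unfold aSet aGet
    rw [pv_pySetD_pyGetD_self, pv_pySetD_pyGetD_self]

-- ---- phase 1: the two relaxations and negative-cycle flags agree ----
theorem pv_round_eq (n : Int) (m : List (List Int)) :
    (PySem.List.permutations (PySem.List.pyRange 0 n 1) 2).foldl (fun m e =>
        let initial := PySem.List.pyGetD e 0 0
        let final := PySem.List.pyGetD e 1 0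
        let others := (PySem.List.pyRange 0 n 1).filter (fun i => !(e.contains i))
        others.foldl (fun m node =>
          aSet m initial final
            (min (aGet m initial final) (aGet m initial node + aGet m node final))) m) m
    = (PySem.List.pyRange 0 n 1).foldl (fun m i =>
        (PySem.List.pyRange 0 n 1).foldl (fun m f =>
          if f == i then m
          else
            (PySem.List.pyRange 0 n 1).foldl (fun m node =>
              if node == i || node == f then m
              else
                let s := aGet m i node + aGet m node f
                if s < aGet m i f then aSet m i f s else m) m) m) m := by
  rw [pv_perms_two _ (PySem.List.nodup_pyRange_one 0 n), List.foldl_flatMap]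
  apply PySem.List.foldl_congr_mem
  intro acc i _
  rw [List.foldl_map]
  have hsym : ∀ (a b : Int), ((a == b) = (b == a)) := fun a b => Bool.beq_comm
  rw [show (fun (m : List (List Int)) f =>
      if f == i then m
      else (PySem.List.pyRange 0 n 1).foldl (fun m node =>
          if node == i || node == f then m
          else
            let s := aGet m i node + aGet m node f
            if s < aGet m i f then aSet m i f s else m) m)
    = (fun m f => if !(f == i) then (PySem.List.pyRange 0 n 1).foldl (fun m node =>
          if node == i || node == f then m
          else
            let s := aGet m i node + aGet m node f
            if s < aGet m i f then aSet m i f s else m) m else m) from by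
      funext m f; cases f == i <;> simp]
  rw [PySem.List.foldl_if_eq_foldl_filter]
  apply PySem.List.foldl_congr_mem
  intro acc2 f _
  simp only []
  rw [show (fun (m : List (List Int)) node =>
      if node == i || node == f then m
      else
        let s := aGet m i node + aGet m node f
        if s < aGet m i f then aSet m i f s else m)
    = (fun m node => if !(node == i || node == f) then
        (let s := aGet m i node + aGet m node f
         if s < aGet m i f then aSet m i f s else m) else m) from by
      funext m node; cases node == i || node == f <;> simp]
  rw [PySem.List.foldl_if_eq_foldl_filter]
  have hfilt : ((PySem.List.pyRange 0 n 1).filter (fun x => !([i, f].contains x)))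
      = ((PySem.List.pyRange 0 n 1).filter (fun node => !(node == i || node == f))) := by
    apply List.filter_congr
    intro x _
    simp only [List.contains_cons, List.contains_nil, Bool.or_false]
  rw [hfilt]
  apply PySem.List.foldl_congr_mem
  intro acc3 node _
  simp only [PySem.List.pyGetD_zero_cons]
  have h1 : PySem.List.pyGetD [i, f] 1 0 = f := by
    simp [PySem.List.pyGetD, PySem.List.pyGet?, PySem.List.pyIdx?]
  rw [h1, pv_aSet_min]

theorem pv_relax_term (times : List (List Int)) :
    (PySem.List.pyRange 0 (PySem.List.len times - 1) 1).foldl (fun m _ =>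
      (PySem.List.permutations (PySem.List.pyRange 0 (PySem.List.len times) 1) 2).foldl (fun m e =>
        let initial := PySem.List.pyGetD e 0 0
        let final := PySem.List.pyGetD e 1 0
        let others := (PySem.List.pyRange 0 (PySem.List.len times) 1).filter (fun i => !(e.contains i))
        others.foldl (fun m node =>
          aSet m initial final
            (min (aGet m initial final) (aGet m initial node + aGet m node final))) m) m) times
    = bRelax times := by
  unfold bRelax
  apply PySem.List.foldl_congr_mem
  intro acc x _
  exact pv_round_eq (PySem.List.len times) acc

theorem pv_negflag (times mt : List (List Int)) :
    (PySem.List.permutations (PySem.List.pyRange 0 (PySem.List.len times) 1) 2).foldl (fun flag e =>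
        let initial := PySem.List.pyGetD e 0 0
        let final := PySem.List.pyGetD e 1 0
        let dists := PySem.List.pyGetD mt 0 []
        if PySem.List.pyGetD dists initial 0 + aGet times initial final
            < PySem.List.pyGetD dists final 0 then true else flag) false
    = bNeg mt times (PySem.List.len times) := by
  rw [show (fun (flag : Bool) (e : List Int) =>
      let initial := PySem.List.pyGetD e 0 0
      let final := PySem.List.pyGetD e 1 0
      let dists := PySem.List.pyGetD mt 0 []
      if PySem.List.pyGetD dists initial 0 + aGet times initial final
          < PySem.List.pyGetD dists final 0 then true else flag)
    = (fun (flag : Bool) (e : List Int) =>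
      if decide (PySem.List.pyGetD (PySem.List.pyGetD mt 0 []) (PySem.List.pyGetD e 0 0) 0
            + aGet times (PySem.List.pyGetD e 0 0) (PySem.List.pyGetD e 1 0)
          < PySem.List.pyGetD (PySem.List.pyGetD mt 0 []) (PySem.List.pyGetD e 1 0) 0)
        then true else flag) from by
    funext flag e
    dsimp only
    by_cases h : PySem.List.pyGetD (PySem.List.pyGetD mt 0 []) (PySem.List.pyGetD e 0 0) 0
          + aGet times (PySem.List.pyGetD e 0 0) (PySem.List.pyGetD e 1 0)
        < PySem.List.pyGetD (PySem.List.pyGetD mt 0 []) (PySem.List.pyGetD e 1 0) 0 <;>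
      simp [h]]
  rw [PySem.List.foldl_if_true_eq, Bool.false_or,
    pv_perms_two _ (PySem.List.nodup_pyRange_one 0 (PySem.List.len times)),
    List.any_flatMap]
  unfold bNeg
  apply PySem.List.any_congr_mem
  intro i _
  rw [List.any_map, List.any_filter]
  apply PySem.List.any_congr_mem
  intro f _
  simp only [Function.comp_apply, PySem.List.pyGetD_zero_cons]
  have h1 : PySem.List.pyGetD [i, f] 1 0 = f := by
    simp [PySem.List.pyGetD, PySem.List.pyGet?, PySem.List.pyIdx?]
  rw [h1]
  rfl

theorem pv_sp_eq (times : List (List Int)) :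
    shortestPathA times
      = (bRelax times, bNeg (bRelax times) times (PySem.List.len times)) := by
  unfold shortestPathA
  dsimp only
  rw [pv_relax_term, pv_negflag]

-- ---- phase 2: mathematical layer ----
-- hmath m r prev S = min over length-r sequences of distinct bunnies from S of the
-- path cost prev -> … -> bulkhead (the value B's table stores at (prev, S, r)).
def hmath (m : List (List Int)) : Nat → Int → List Int → Int
  | 0, prev, _ => aGet m prev (-1)
  | r + 1, prev, S =>
    (PySem.List.min?
      (S.map (fun b => aGet m prev (b + 1) +
        hmath m r (b + 1) (S.filter (fun x => !(x == b)))))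
      (fun v => v)).getD 0

-- the lexicographically first feasible permutation, built greedily
def greedyM (m : List (List Int)) (t : Int) : Nat → List Int → Int → Int → List Int
  | 0, _, _, _ => []
  | k + 1, avail, prev, c =>
    match avail.find? (fun b => decide (c + aGet m prev (b + 1) +
        hmath m k (b + 1) (avail.filter (fun x => !(x == b))) ≤ t)) with
    | none => []
    | some b => b :: greedyM m t k (avail.filter (fun x => !(x == b))) (b + 1)
        (c + aGet m prev (b + 1))

theorem pv_listMin_le_iff (vs : List Int) (hne : vs ≠ []) (t : Int) :
    ((PySem.List.min? vs (fun v => v)).getD 0 ≤ t) ↔ ∃ v ∈ vs, v ≤ t := by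
  cases h : PySem.List.min? vs (fun v => v) with
  | none => exact absurd ((PySem.List.min?_eq_none_iff _ _).mp h) hne
  | some w =>
    simp only [Option.getD_some]
    constructor
    · exact fun hw => ⟨w, PySem.List.min?_mem h, hw⟩
    · rintro ⟨v, hv, hvt⟩
      exact le_trans (PySem.List.min?_isMin h v hv) hvt

theorem pv_filter_ne_eq_erase (xs : List Int) (h : xs.Nodup) (b : Int) :
    xs.filter (fun y => !(y == b)) = xs.erase b := by
  rw [h.erase_eq_filter]
  rfl

theorem pv_length_filter_ne (xs : List Int) (h : xs.Nodup) (b : Int) (hb : b ∈ xs) :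
    (xs.filter (fun y => !(y == b))).length + 1 = xs.length := by
  rw [pv_filter_ne_eq_erase xs h b]
  rw [List.length_erase_of_mem hb]
  have : xs.length ≠ 0 := by
    intro h0
    rw [List.length_eq_zero_iff.mp h0] at hb
    exact absurd hb (List.not_mem_nil)
  omega

theorem pv_listMin_le_mem (vs : List Int) (v : Int) (hv : v ∈ vs) :
    (PySem.List.min? vs (fun v => v)).getD 0 ≤ v := by
  cases h : PySem.List.min? vs (fun v => v) with
  | none =>
    rw [(PySem.List.min?_eq_none_iff _ _).mp h] at hv
    exact absurd hv (List.not_mem_nil)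
  | some w =>
    simpa using PySem.List.min?_isMin h v hv

theorem pv_findSome?_congr_mem {α β : Type} {l : List α} {f g : α → Option β}
    (h : ∀ x ∈ l, f x = g x) : l.findSome? f = l.findSome? g := by
  induction l with
  | nil => rfl
  | cons x xs ih =>
    simp only [List.findSome?_cons, h x (by simp)]
    cases g x
    · exact ih (fun y hy => h y (by simp [hy]))
    · rfl

theorem pv_findSome?_ite {α β : Type} (l : List α) (p : α → Prop) [DecidablePred p]
    (g : α → β) :
    l.findSome? (fun x => if p x then some (g x) else none)
      = (l.find? (fun x => decide (p x))).map g := by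
  induction l with
  | nil => rfl
  | cons x xs ih =>
    simp only [List.findSome?_cons, List.find?_cons]
    by_cases h : p x <;> simp [h, ih]

-- the permutation scan, with accumulated cost, equals feasibility-test + greedy choice
theorem pv_greedy_eq (m : List (List Int)) (t : Int) :
    ∀ (k : Nat) (avail : List Int) (prev c : Int), avail.Nodup → k ≤ avail.length →
      (PySem.List.permutations avail k).find? (fun p => decide (gptGo m prev c p ≤ t)) =
        if c + hmath m k prev avail ≤ t then some (greedyM m t k avail prev c) else none := by
  intro k
  induction k with
  | zero =>
    intro avail prev c _ _
    show (List.find? _ [[]]) = _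
    simp only [List.find?_cons, List.find?_nil]
    by_cases h : c + aGet m prev (-1) ≤ t <;>
      simp [h, greedyM, gptGo, hmath]
  | succ k ih =>
    intro avail prev c hnd hlen
    rw [pv_perms_succ_filter avail hnd k, pv_find?_flatMap]
    have hstep : ∀ b ∈ avail,
        ((PySem.List.permutations (avail.filter (fun y => !(y == b))) k).map (b :: ·)).find?
            (fun p => decide (gptGo m prev c p ≤ t))
          = (if c + aGet m prev (b + 1)
                + hmath m k (b + 1) (avail.filter (fun y => !(y == b))) ≤ t
             then some (b :: greedyM m t k (avail.filter (fun y => !(y == b))) (b + 1)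
                 (c + aGet m prev (b + 1)))
             else none) := by
      intro b hb
      rw [List.find?_map]
      have hcomp : ((fun p => decide (gptGo m prev c p ≤ t)) ∘ (b :: ·))
          = (fun p => decide (gptGo m (b + 1) (c + aGet m prev (b + 1)) p ≤ t)) := rfl
      have hflen : k ≤ (avail.filter (fun y => !(y == b))).length := by
        have := pv_length_filter_ne avail hnd b hb
        omega
      rw [hcomp, ih _ _ _ (hnd.filter _) hflen]
      split <;> rfl
    rw [pv_findSome?_congr_mem hstep,
      pv_findSome?_ite avail
        (p := fun b => c + aGet m prev (b + 1)
          + hmath m k (b + 1) (avail.filter (fun y => !(y == b))) ≤ t)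
        (g := fun b => b :: greedyM m t k (avail.filter (fun y => !(y == b))) (b + 1)
          (c + aGet m prev (b + 1)))]
    have hmsucc : hmath m (k + 1) prev avail
        = (PySem.List.min? (avail.map (fun b => aGet m prev (b + 1)
            + hmath m k (b + 1) (avail.filter (fun y => !(y == b))))) (fun v => v)).getD 0 := rfl
    have hne : avail ≠ [] := by
      intro h0; rw [h0] at hlen; simp at hlen
    cases hf : avail.find? (fun b => decide (c + aGet m prev (b + 1)
        + hmath m k (b + 1) (avail.filter (fun y => !(y == b))) ≤ t)) with
    | some b0 =>
      have hcond : c + aGet m prev (b0 + 1)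
          + hmath m k (b0 + 1) (avail.filter (fun y => !(y == b0))) ≤ t := by
        have := List.find?_some hf
        exact of_decide_eq_true this
      have hb0 : b0 ∈ avail := List.mem_of_find?_eq_some hf
      have hfeas : c + hmath m (k + 1) prev avail ≤ t := by
        have hmem : (aGet m prev (b0 + 1)
            + hmath m k (b0 + 1) (avail.filter (fun y => !(y == b0))))
            ∈ avail.map (fun b => aGet m prev (b + 1)
              + hmath m k (b + 1) (avail.filter (fun y => !(y == b)))) :=
          List.mem_map_of_mem hb0
        have hmin := pv_listMin_le_mem _ _ hmem
        rw [hmsucc]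
        omega
      rw [if_pos hfeas]
      show _ = some (greedyM m t (k + 1) avail prev c)
      have hgr : greedyM m t (k + 1) avail prev c
          = b0 :: greedyM m t k (avail.filter (fun y => !(y == b0))) (b0 + 1)
              (c + aGet m prev (b0 + 1)) := by
        rw [greedyM.eq_def]
        dsimp only
        rw [hf]
      rw [hgr]
      rfl
    | none =>
      have hnofeas : ¬ (c + hmath m (k + 1) prev avail ≤ t) := by
        intro hle
        have hle' : (PySem.List.min? (avail.map (fun b => aGet m prev (b + 1)
            + hmath m k (b + 1) (avail.filter (fun y => !(y == b))))) (fun v => v)).getD 0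
            ≤ t - c := by rw [hmsucc] at hle; omega
        have hmap : avail.map (fun b => aGet m prev (b + 1)
            + hmath m k (b + 1) (avail.filter (fun y => !(y == b)))) ≠ [] := by
          simpa using hne
        obtain ⟨v, hv, hvle⟩ := (pv_listMin_le_iff _ hmap (t - c)).mp hle'
        obtain ⟨b, hb, rfl⟩ := List.mem_map.mp hv
        have hfalse := (List.find?_eq_none.mp hf) b hb
        exact hfalse (decide_eq_true (by omega))
      rw [if_neg hnofeas]
      rfl

-- ---- the memo table is correct ----
theorem pv_getD_fold_insert_not_mem {K : Type} [BEq K] [LawfulBEq K] [DecidableEq K]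
    (F : PySem.Dict K Int → K → Int) (L : List K) :
    ∀ (d : PySem.Dict K Int) (k : K), k ∉ L →
      (L.foldl (fun d k' => d.insert k' (F d k')) d).getD k 0 = d.getD k 0 := by
  induction L with
  | nil => intro d k _; rfl
  | cons k0 L' ih =>
    intro d k hk
    rw [List.foldl_cons, ih _ k (fun h => hk (by simp [h])),
      PySem.Dict.getD_insert]
    rw [if_neg (fun h => hk (by simp [h]))]

-- the key type of B's table and its well-formedness
def hKWF (n nb : Int) (key : Int × List Int × Int) : Prop :=
  0 ≤ key.1 ∧ key.1 < n ∧ key.2.1.Sublist (PySem.List.pyRange 0 nb 1) ∧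
    ∃ r : Nat, key.2.2 = (r : Int) ∧ r ≤ key.2.1.length

-- the intended table value
def hVal (m : List (List Int)) (key : Int × List Int × Int) : Int :=
  hmath m key.2.2.toNat key.1 key.2.1

-- the value B's build step stores
def hF (m : List (List Int)) (d : PySem.Dict (Int × List Int × Int) Int)
    (key : Int × List Int × Int) : Int :=
  if key.2.2 == 0 then aGet m key.1 (-1)
  else (PySem.List.min?
        (key.2.1.map (fun b => aGet m key.1 (b + 1) +
          d.getD (b + 1, key.2.1.filter (fun x => !(x == b)), key.2.2 - 1) 0))
        (fun v => v)).getD 0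

theorem pv_bBuildH_eq (m : List (List Int)) (keys : List (Int × List Int × Int)) :
    bBuildH m keys = keys.foldl (fun d key => d.insert key (hF m d key)) PySem.Dict.empty := rfl

theorem pv_hF_correct (m : List (List Int)) (n nb : Int) (hn : nb + 1 ≤ n)
    (d : PySem.Dict (Int × List Int × Int) Int) (key : Int × List Int × Int)
    (hkey : hKWF n nb key)
    (hd : ∀ k', hKWF n nb k' → k'.2.1.length < key.2.1.length → d.getD k' 0 = hVal m k') :
    hF m d key = hVal m key := by
  obtain ⟨prev, S, rInt⟩ := key
  obtain ⟨hp0, hpn, hsub, r, hr, hrle⟩ := hkey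
  have hSnd : S.Nodup := hsub.nodup (PySem.List.nodup_pyRange_one 0 nb)
  subst hr
  cases r with
  | zero =>
    simp [hF, hVal, hmath]
  | succ r' =>
    have hne0 : (((r' + 1 : Nat) : Int) == 0) = false := by
      simp
      omega
    unfold hF hVal
    simp only [hne0, Bool.false_eq_true, if_false]
    have htn : ((((r' : Nat) + 1 : Nat) : Int)).toNat = r' + 1 := by omega
    rw [htn]
    show _ = hmath m (r' + 1) prev S
    rw [hmath.eq_def]
    dsimp only
    congr 2
    apply List.map_congr_left
    intro b hb
    congr 1
    have hbfull : b ∈ PySem.List.pyRange 0 nb 1 := hsub.subset hb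
    have hbb : 0 ≤ b ∧ b < nb := PySem.List.mem_pyRange_one.mp hbfull
    have hflen : (S.filter (fun x => !(x == b))).length + 1 = S.length :=
      pv_length_filter_ne S hSnd b hb
    have hcast : ((r' + 1 : Nat) : Int) - 1 = ((r' : Nat) : Int) := by push_cast; ring
    rw [hcast]
    rw [hd (b + 1, S.filter (fun x => !(x == b)), ((r' : Nat) : Int))
      ⟨by omega, by omega, List.filter_sublist.trans hsub,
        ⟨r', rfl, by simp at hrle ⊢; omega⟩⟩ (by simp; omega)]
    unfold hVal
    simp [Int.toNat_natCast]

-- one size level of the build writes all its keys correctly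
theorem pv_level (m : List (List Int)) (n nb : Int) (hn : nb + 1 ≤ n) (σ : Nat) :
    ∀ (L : List (Int × List Int × Int)) (d : PySem.Dict (Int × List Int × Int) Int),
      (∀ k ∈ L, hKWF n nb k ∧ k.2.1.length = σ) →
      (∀ k, hKWF n nb k → k.2.1.length < σ → d.getD k 0 = hVal m k) →
      (∀ k, (hKWF n nb k ∧ k.2.1.length < σ) ∨ k ∈ L →
        (L.foldl (fun d key => d.insert key (hF m d key)) d).getD k 0 = hVal m k) := by
  intro L
  induction L with
  | nil =>
    intro d _ hd k hk
    rcases hk with ⟨hwf, hlt⟩ | hmem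
    · exact hd k hwf hlt
    · exact absurd hmem (List.not_mem_nil)
  | cons k0 L' ih =>
    intro d hL hd k hk
    rw [List.foldl_cons]
    have hk0 := hL k0 (by simp)
    have hv0 : hF m d k0 = hVal m k0 :=
      pv_hF_correct m n nb hn d k0 hk0.1 (fun k' hw hlen => hd k' hw (hk0.2 ▸ hlen))
    have hd1 : ∀ k', hKWF n nb k' → k'.2.1.length < σ →
        (d.insert k0 (hF m d k0)).getD k' 0 = hVal m k' := by
      intro k' hw hlen
      rw [PySem.Dict.getD_insert]
      have hne : k' ≠ k0 := by
        intro he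
        rw [he] at hlen
        have := hk0.2
        omega
      rw [if_neg hne, hd k' hw hlen]
    have hres := ih (d.insert k0 (hF m d k0)) (fun k hk => hL k (by simp [hk])) hd1
    rcases hk with ⟨hwf, hlt⟩ | hmem
    · exact hres k (Or.inl ⟨hwf, hlt⟩)
    · rcases List.mem_cons.mp hmem with he | hm
      · subst he
        by_cases hmem' : k ∈ L'
        · exact hres k (Or.inr hmem')
        · rw [pv_getD_fold_insert_not_mem _ _ _ _ hmem']
          rw [PySem.Dict.getD_insert, if_pos rfl, hv0]
      · exact hres k (Or.inr hm)

-- ---- B's reconstruction loop computes greedyM ----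
def hLs (n nb : Int) (sz : Nat) : List (Int × List Int × Int) :=
  (PySem.List.combinations (PySem.List.pyRange 0 nb 1) sz).flatMap (fun S =>
    (PySem.List.pyRange 0 n 1).flatMap (fun prev =>
      (PySem.List.pyRange 0 ((sz : Int) + 1) 1).map (fun r => (prev, S, r))))

theorem pv_bKeys_eq (n nb : Int) :
    bKeys nb n = (List.range (nb + 1).toNat).flatMap (fun sz => hLs n nb sz) := by
  unfold bKeys hLs
  rw [PySem.List.pyRange_zero (nb + 1), List.flatMap_map]
  apply List.flatMap_congr
  intro sz _
  simp [Int.toNat_natCast]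

theorem pv_mem_hLs_wf (n nb : Int) (sz : Nat) :
    ∀ k ∈ hLs n nb sz, hKWF n nb k ∧ k.2.1.length = sz := by
  intro k hk
  unfold hLs at hk
  obtain ⟨S, hS, hk⟩ := List.mem_flatMap.mp hk
  obtain ⟨prev, hprev, hk⟩ := List.mem_flatMap.mp hk
  obtain ⟨r, hr, rfl⟩ := List.mem_map.mp hk
  obtain ⟨hSsub, hSlen⟩ := (PySem.List.mem_combinations_iff _ _ _).mp hS
  obtain ⟨hp0, hpn⟩ := PySem.List.mem_pyRange_one.mp hprev
  obtain ⟨hr0, hrlt⟩ := PySem.List.mem_pyRange_one.mp hr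
  refine ⟨⟨hp0, hpn, hSsub, r.toNat, by simp only; omega, by simp only; omega⟩, hSlen⟩

theorem pv_mem_hLs_complete (n nb : Int) (sz : Nat) (k : Int × List Int × Int)
    (hwf : hKWF n nb k) (hlen : k.2.1.length = sz) : k ∈ hLs n nb sz := by
  obtain ⟨prev, S, rI⟩ := k
  obtain ⟨hp0, hpn, hsub, r, hr, hrle⟩ := hwf
  have hr' : rI = (r : Int) := hr
  have hrle' : r ≤ S.length := hrle
  have hlen' : S.length = sz := hlen
  subst hr'
  unfold hLs
  refine List.mem_flatMap.mpr ⟨S, (PySem.List.mem_combinations_iff _ _ _).mpr ⟨hsub, hlen⟩,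
    List.mem_flatMap.mpr ⟨prev, PySem.List.mem_pyRange_one.mpr ⟨hp0, hpn⟩,
      List.mem_map.mpr ⟨(r : Int), PySem.List.mem_pyRange_one.mpr ⟨by omega, by omega⟩, rfl⟩⟩⟩

theorem pv_levels (m : List (List Int)) (n nb : Int) (hn : nb + 1 ≤ n) :
    ∀ (τ : Nat) (k : Int × List Int × Int), hKWF n nb k → k.2.1.length < τ →
      ((List.range τ).foldl (fun d sz =>
          (hLs n nb sz).foldl (fun d key => d.insert key (hF m d key)) d)
        PySem.Dict.empty).getD k 0 = hVal m k := by
  intro τ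
  induction τ with
  | zero => intro k _ h; omega
  | succ τ ih =>
    intro k hwf hlen
    rw [List.range_succ, List.foldl_append, List.foldl_cons, List.foldl_nil]
    apply pv_level m n nb hn τ _ _ (pv_mem_hLs_wf n nb τ) ih
    by_cases hc : k.2.1.length < τ
    · exact Or.inl ⟨hwf, hc⟩
    · exact Or.inr (pv_mem_hLs_complete n nb τ k hwf (by omega))

theorem pv_H_correct (m : List (List Int)) (n nb : Int) (hn : nb + 1 ≤ n) (hnb : 0 ≤ nb) :
    ∀ (prev : Int) (S : List Int) (r : Nat), 0 ≤ prev → prev < n →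
      S.Sublist (PySem.List.pyRange 0 nb 1) → r ≤ S.length →
      (bBuildH m (bKeys nb n)).getD (prev, S, (r : Int)) 0 = hmath m r prev S := by
  intro prev S r hp0 hpn hsub hrle
  rw [pv_bBuildH_eq, pv_bKeys_eq n nb, List.foldl_flatMap]
  have hSlen : S.length ≤ nb.toNat := by
    have := hsub.length_le
    rw [PySem.List.length_pyRange_one] at this
    omega
  have := pv_levels m n nb hn (nb + 1).toNat (prev, S, (r : Int))
    ⟨hp0, hpn, hsub, r, rfl, hrle⟩ (by show S.length < (nb + 1).toNat; omega)
  simpa [hVal, Int.toNat_natCast] using this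

theorem pv_greedy_fold (m : List (List Int)) (t n nb : Int) (hn : nb + 1 ≤ n) (k : Int)
    (hk : 0 < k) (hknb : k ≤ nb) :
    ∀ (len j0 : Nat) (avail : List Int) (prev c : Int) (chosen : List Int),
      j0 + len = k.toNat → avail.Nodup → avail.Sublist (PySem.List.pyRange 0 nb 1) →
      len ≤ avail.length → 0 ≤ prev → prev < n →
      c + hmath m len prev avail ≤ t →
      ((List.range' j0 len).foldl
        (fun (st : List Int × Int × Int × List Int) (j : Nat) =>
          let avail := st.1; let prev := st.2.1; let c := st.2.2.1; let chosen := st.2.2.2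
          match avail.find? (fun b => decide (c + aGet m prev (b + 1) +
              (bBuildH m (bKeys nb n)).getD
                (b + 1, avail.filter (fun x => !(x == b)), k - 1 - (j : Int)) 0 ≤ t)) with
          | none => st
          | some b => (avail.erase b, b + 1, c + aGet m prev (b + 1), chosen ++ [b]))
        (avail, prev, c, chosen)).2.2.2 = chosen ++ greedyM m t len avail prev c := by
  intro len
  induction len with
  | zero =>
    intro j0 avail prev c chosen _ _ _ _ _ _ _
    rw [List.range'_zero, List.foldl_nil]
    simp [greedyM]
  | succ len ih =>
    intro j0 avail prev c chosen hsum hnd hsub hlen hp0 hpn hfeas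
    rw [List.range'_succ, List.foldl_cons]
    have hnb0 : 0 ≤ nb := by omega
    have hkc : k - 1 - (j0 : Int) = ((len : Nat) : Int) := by omega
    have hpredEq : ∀ b ∈ avail,
        (decide (c + aGet m prev (b + 1) + (bBuildH m (bKeys nb n)).getD
            (b + 1, avail.filter (fun x => !(x == b)), k - 1 - (j0 : Int)) 0 ≤ t))
        = (decide (c + aGet m prev (b + 1)
            + hmath m len (b + 1) (avail.filter (fun x => !(x == b))) ≤ t)) := by
      intro b hb
      have hbb := PySem.List.mem_pyRange_one.mp (hsub.subset hb)
      have hflen := pv_length_filter_ne avail hnd b hb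
      rw [hkc, pv_H_correct m n nb hn hnb0 (b + 1) _ len (by omega) (by omega)
        (List.filter_sublist.trans hsub) (by omega)]
    have hmsucc : hmath m (len + 1) prev avail
        = (PySem.List.min? (avail.map (fun b => aGet m prev (b + 1)
            + hmath m len (b + 1) (avail.filter (fun y => !(y == b))))) (fun v => v)).getD 0 := rfl
    have hne : avail ≠ [] := by
      intro h0; rw [h0] at hlen; simp at hlen
    obtain ⟨b0, hf⟩ : ∃ b0, avail.find? (fun b => decide (c + aGet m prev (b + 1)
        + hmath m len (b + 1) (avail.filter (fun x => !(x == b))) ≤ t)) = some b0 := by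
      cases hfc : avail.find? (fun b => decide (c + aGet m prev (b + 1)
          + hmath m len (b + 1) (avail.filter (fun x => !(x == b))) ≤ t)) with
      | some b0 => exact ⟨b0, rfl⟩
      | none =>
        exfalso
        have hle' : (PySem.List.min? (avail.map (fun b => aGet m prev (b + 1)
            + hmath m len (b + 1) (avail.filter (fun y => !(y == b))))) (fun v => v)).getD 0
            ≤ t - c := by rw [hmsucc] at hfeas; omega
        have hmap : avail.map (fun b => aGet m prev (b + 1)
            + hmath m len (b + 1) (avail.filter (fun y => !(y == b)))) ≠ [] := by
          simpa using hne
        obtain ⟨v, hv, hvle⟩ := (pv_listMin_le_iff _ hmap (t - c)).mp hle'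
        obtain ⟨b, hb, rfl⟩ := List.mem_map.mp hv
        exact (List.find?_eq_none.mp hfc) b hb (decide_eq_true (by omega))
    have hb0 : b0 ∈ avail := List.mem_of_find?_eq_some hf
    have hb0b := PySem.List.mem_pyRange_one.mp (hsub.subset hb0)
    have hcond : c + aGet m prev (b0 + 1)
        + hmath m len (b0 + 1) (avail.filter (fun x => !(x == b0))) ≤ t := by
      have hdec := List.find?_some hf
      exact of_decide_eq_true hdec
    dsimp only
    rw [pv_find?_congr_mem hpredEq, hf]
    dsimp only
    have hlenerase : (avail.erase b0).length + 1 = avail.length := by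
      rw [← pv_filter_ne_eq_erase avail hnd b0]
      exact pv_length_filter_ne avail hnd b0 hb0
    have hrec := ih (j0 + 1) (avail.erase b0) (b0 + 1) (c + aGet m prev (b0 + 1))
      (chosen ++ [b0]) (by omega) (hnd.erase b0) ((List.erase_sublist).trans hsub)
      (by omega) (by omega) (by omega)
      (by rw [← pv_filter_ne_eq_erase avail hnd b0]; omega)
    rw [hrec]
    have hgr : greedyM m t (len + 1) avail prev c
        = b0 :: greedyM m t len (avail.filter (fun y => !(y == b0))) (b0 + 1)
            (c + aGet m prev (b0 + 1)) := by
      rw [greedyM.eq_def]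
      dsimp only
      rw [hf]
    rw [hgr, pv_filter_ne_eq_erase avail hnd b0]
    simp

-- ===== VERDICT (by name: the statement is the Claim_ definition above) =====
theorem solution_spec : Claim_equal_solution := by
  intro times time_limit _hdom _hpre
  unfold Spec_solution
  show solution times time_limit = solution_alt times time_limit
  unfold solution solution_alt
  dsimp only
  rw [pv_sp_eq]
  dsimp only
  by_cases hneg : bNeg (bRelax times) times (PySem.List.len times) = true
  · rw [if_pos hneg, if_pos hneg]
  · rw [if_neg hneg, if_neg hneg]
    by_cases hnb : PySem.List.len times - 2 ≤ 0
    · rw [if_pos hnb, PySem.List.pyRange_neg_one_eq_nil hnb]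
      rfl
    · rw [if_neg hnb]
      have hlen0 : (0 : Int) ≤ PySem.List.len times := by
        simp [PySem.List.len_eq]
      set nI := PySem.List.len times with hnI
      set nb := nI - 2 with hnbdef
      set m := bRelax times with hm
      set full := PySem.List.pyRange 0 nb 1 with hfull
      have hn1 : nb + 1 ≤ nI := by omega
      have hnbpos : 1 ≤ nb := by omega
      have hfulllen : full.length = nb.toNat := by
        rw [hfull, PySem.List.length_pyRange_one]
        omega
      have hfullnd : full.Nodup := PySem.List.nodup_pyRange_one 0 nb
      have hA : ∀ k ∈ PySem.List.pyRange nb 0 (-1),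
          (match (PySem.List.permutations full k.toNat).find?
              (fun p => decide (getPathTime p m ≤ time_limit)) with
            | some p => some (PySem.List.sorted p (fun x => x) false)
            | none => none)
          = if (0 : Int) + hmath m k.toNat 0 full ≤ time_limit
            then some (PySem.List.sorted (greedyM m time_limit k.toNat full 0 0)
              (fun x => x) false)
            else none := by
        intro k hk
        obtain ⟨hk0, hknb⟩ := PySem.List.mem_pyRange_neg_one.mp hk
        have hklen : k.toNat ≤ full.length := by omega
        rw [pv_find?_congr_mem (l := PySem.List.permutations full k.toNat)
          (p := fun p => decide (getPathTime p m ≤ time_limit))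
          (q := fun p => decide (gptGo m 0 0 p ≤ time_limit)) (fun _ _ => rfl)]
        have hge := pv_greedy_eq m time_limit k.toNat full 0 0 hfullnd hklen
        rw [hge]
        by_cases hc : (0 : Int) + hmath m k.toNat 0 full ≤ time_limit
        · rw [if_pos hc, if_pos hc]
        · rw [if_neg hc, if_neg hc]
      rw [pv_findSome?_congr_mem hA,
        pv_findSome?_ite (PySem.List.pyRange nb 0 (-1))
          (p := fun k => (0 : Int) + hmath m k.toNat 0 full ≤ time_limit)
          (g := fun k => PySem.List.sorted (greedyM m time_limit k.toNat full 0 0)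
            (fun x => x) false)]
      have hB : ∀ k ∈ PySem.List.pyRange nb 0 (-1),
          (decide ((bBuildH m (bKeys nb nI)).getD (0, full, k) 0 ≤ time_limit))
          = (decide ((0 : Int) + hmath m k.toNat 0 full ≤ time_limit)) := by
        intro k hk
        obtain ⟨hk0, hknb⟩ := PySem.List.mem_pyRange_neg_one.mp hk
        have hkey : ((0 : Int), full, k) = ((0 : Int), full, ((k.toNat : Nat) : Int)) := by
          rw [Int.toNat_of_nonneg (by omega)]
        rw [hkey, pv_H_correct m nI nb hn1 (by omega) 0 full k.toNat (le_refl 0)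
          (by omega) (List.Sublist.refl full) (by omega)]
        exact decide_eq_decide.mpr (by constructor <;> intro <;> omega)
      rw [pv_find?_congr_mem hB]
      cases hfind : (PySem.List.pyRange nb 0 (-1)).find?
          (fun k => decide ((0 : Int) + hmath m k.toNat 0 full ≤ time_limit)) with
      | none => rfl
      | some k =>
        obtain ⟨hk0, hknb⟩ :=
          PySem.List.mem_pyRange_neg_one.mp (List.mem_of_find?_eq_some hfind)
        have hfeas : (0 : Int) + hmath m k.toNat 0 full ≤ time_limit := by
          have hdec := List.find?_some hfind
          exact of_decide_eq_true hdec
        rw [Option.map_some]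
        show some _ = some _
        rw [PySem.List.pyRange_zero k, List.foldl_map, List.range_eq_range']
        rw [pv_greedy_fold m time_limit nI nb hn1 k hk0 hknb k.toNat 0 full 0 0 []
          (by omega) hfullnd (List.Sublist.refl full) (by omega) (le_refl 0)
          (by omega) hfeas]
        rfl
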